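-- pv_equiv track=rewrite | github.com/pypi-data/pypi-mirror-402 | packages/veeksha/veeksha-0.2.0.tar.gz/veeksha-0.2.0/veeksha/generator/session/trace/prompt_builder.py | base10_to_basen
-- ===== SOURCE A (Python) =====
-- from typing import List, Optional
--
-- def base10_to_basen(x: int, n: int) -> List[int]:
--     """Convert a base-10 integer to base-n representation."""
--     assert x >= 0
--     assert n >= 2
--     digits = []
--     while x > 0:
--         digits.append(x % n)
--         x = x // n
--     digits.reverse()
--     return digits
-- ===== SOURCE B (Python) =====
-- def base10_to_basen(x, n):
--     """Convert a base-10 integer to base-n representation."""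
--     assert x >= 0
--     assert n >= 2
--     if x == 0:
--         return []
--     p = 1
--     while p * n <= x:
--         p *= n
--     digits = []
--     while p >= 1:
--         digits.append(x // p)
--         x %= p
--         p //= n
--     return digits
-- ===== Notes on version B (the rewrite author's own statement) =====
-- stated objective: alternative
-- what changed: Replaced the append-then-reverse least-significant-first loop by a most-significant-first algorithm: first find the largest power p=n**k with p<=x by multiplying up, then emit digits top-down with x//p, x%=p, p//=n; no list reversal.
import Mathlib
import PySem

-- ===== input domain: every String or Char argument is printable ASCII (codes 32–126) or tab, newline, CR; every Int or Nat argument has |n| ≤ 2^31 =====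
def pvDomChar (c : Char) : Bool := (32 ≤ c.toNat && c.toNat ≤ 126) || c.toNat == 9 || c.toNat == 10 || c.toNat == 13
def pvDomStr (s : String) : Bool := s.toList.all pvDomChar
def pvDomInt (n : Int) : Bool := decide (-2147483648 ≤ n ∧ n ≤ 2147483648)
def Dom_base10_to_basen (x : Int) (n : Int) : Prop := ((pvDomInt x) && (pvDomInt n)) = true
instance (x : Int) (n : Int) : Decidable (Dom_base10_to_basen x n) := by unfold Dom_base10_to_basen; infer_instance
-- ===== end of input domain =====

-- B replaces A's least-significant-first append-then-reverse loop by a most-significant-first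
-- algorithm: find the largest power p = n^k with p ≤ x, then emit x//p, x %= p, p //= n top-down
-- (objective: alternative; no speed claim).

-- ===== PORT A =====
-- A's while loop: append x % n, set x = x // n, while x > 0; fuel x.toNat+1 is a totality
-- guard only (x strictly decreases each iteration whenever the asserts x ≥ 0, n ≥ 2 hold).
def pvALoop : Nat → Int → Int → List Int → List Int
  | 0, _, _, digits => digits
  | fuel+1, x, n, digits =>
    if x > 0 then
      pvALoop fuel (PySem.Int.floordiv x n) n (digits ++ [PySem.Int.mod x n])
    else digits

def base10_to_basen (x : Int) (n : Int) : List Int :=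
  (pvALoop (x.toNat + 1) x n []).reverse

-- ===== PORT B =====
-- B's first loop: p = 1; while p * n <= x: p *= n.  Fuel is a totality guard only
-- (p at least doubles each step, so x.toNat+1 steps always suffice on admitted inputs).
def pvBPow : Nat → Int → Int → Int → Int
  | 0, _, _, p => p
  | fuel+1, x, n, p => if p * n ≤ x then pvBPow fuel x n (p * n) else p

-- B's second loop: while p >= 1: emit x // p; x %= p; p //= n.  The emitted digit is the
-- head of the result (the loop produces the digits in final order, no reversal).
def pvBDigits : Nat → Int → Int → Int → List Int
  | 0, _, _, _ => []
  | fuel+1, x, n, p =>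
    if 1 ≤ p then
      PySem.Int.floordiv x p :: pvBDigits fuel (PySem.Int.mod x p) n (PySem.Int.floordiv p n)
    else []

def base10_to_basen_alt (x : Int) (n : Int) : List Int :=
  if x = 0 then []
  else pvBDigits (x.toNat + 1) x n (pvBPow (x.toNat + 1) x n 1)

-- ===== PRECONDITION & SPEC =====
-- Pre_ excludes exactly the inputs on which A's asserts raise AssertionError (x < 0 or n < 2).
def Pre_base10_to_basen (x : Int) (n : Int) : Prop := 0 ≤ x ∧ 2 ≤ n
instance (x : Int) (n : Int) : Decidable (Pre_base10_to_basen x n) := by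
  unfold Pre_base10_to_basen; infer_instance

def pvWitness_base10_to_basen : Int × Int := (13, 2)

def Spec_base10_to_basen (x : Int) (n : Int) (out : List Int) : Prop := out = base10_to_basen_alt x n
instance (x : Int) (n : Int) (out : List Int) : Decidable (Spec_base10_to_basen x n out) := by
  unfold Spec_base10_to_basen; infer_instance

-- ===== CLAIM (what is proved, stated in full; the proofs are below) =====
def Claim_equal_base10_to_basen : Prop := ∀ (x : Int) (n : Int), Dom_base10_to_basen x n → Pre_base10_to_basen x n → Spec_base10_to_basen x n (base10_to_basen x n)

-- ===== LEMMAS AND PROOFS =====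

-- canonical least-significant-first recursion, used only as the bridge between the two ports
def pvRecLSB : Nat → Int → Int → List Int
  | 0, _, _ => []
  | fuel+1, x, n =>
    if x = 0 then []
    else pvRecLSB fuel (PySem.Int.floordiv x n) n ++ [PySem.Int.mod x n]

-- fixed-width (k digits, leading zeros kept) big-endian digit list, via ediv/emod
def pvPadDigits : Nat → Int → Int → List Int
  | 0, _, _ => []
  | m+1, x, n => pvPadDigits m (x / n) n ++ [x % n]

theorem pv_floordiv_bounds (x n : Int) (hx : 0 < x) (hn : 2 ≤ n) :
    0 ≤ PySem.Int.floordiv x n ∧ PySem.Int.floordiv x n < x := by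
  rw [PySem.Int.floordiv_eq_ediv_of_pos (by omega)]
  have hq : 0 ≤ x / n := Int.ediv_nonneg (by omega) (by omega)
  have hdm := Int.mul_ediv_add_emod x n
  have hr : 0 ≤ x % n := Int.emod_nonneg x (by omega)
  refine ⟨hq, ?_⟩
  nlinarith [hdm, hq, hr]

theorem pvALoop_reverse_eq (fuel : Nat) :
    ∀ (x n : Int) (d : List Int), 2 ≤ n → 0 ≤ x → x.toNat < fuel →
      (pvALoop fuel x n d).reverse = pvRecLSB fuel x n ++ d.reverse := by
  induction fuel with
  | zero => intro x n d _ _ h; omega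
  | succ fuel ih =>
    intro x n d hn hx hfuel
    by_cases hpos : x > 0
    · have hb := pv_floordiv_bounds x n hpos hn
      have hlt : (PySem.Int.floordiv x n).toNat < fuel := by omega
      simp only [pvALoop, pvRecLSB, if_pos hpos, if_neg (by omega : ¬ x = 0)]
      rw [ih (PySem.Int.floordiv x n) n (d ++ [PySem.Int.mod x n]) hn hb.1 hlt]
      simp
    · have hz : x = 0 := by omega
      simp [pvALoop, pvRecLSB, hz]

theorem pv_emod_mul_ediv (x n P : Int) (hn : 0 < n) (hP : 0 < P) :
    x % (n * P) / n = x / n % P := by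
  conv_rhs => rw [← Int.mul_ediv_add_emod x (n * P)]
  have h1 : (n * P * (x / (n * P)) + x % (n * P)) / n = x % (n * P) / n + P * (x / (n * P)) := by
    rw [mul_assoc, add_comm, Int.add_mul_ediv_left _ _ (show n ≠ 0 by omega)]
  rw [h1, Int.add_mul_emod_self_left]
  have hr0 : 0 ≤ x % (n * P) := Int.emod_nonneg x (by positivity)
  have hrlt : x % (n * P) < n * P := Int.emod_lt_of_pos x (by positivity)
  have h2 : x % (n * P) / n < P := by rw [Int.ediv_lt_iff_lt_mul hn]; linarith
  exact (Int.emod_eq_of_lt (Int.ediv_nonneg hr0 (by omega)) h2).symm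

-- splitting off the most-significant digit of a fixed-width digit list
theorem pv_msb_split (n : Int) (hn : 2 ≤ n) :
    ∀ (m : Nat) (x : Int), 0 ≤ x → x < n ^ (m + 1) →
      pvPadDigits (m + 1) x n = x / n ^ m :: pvPadDigits m (x % n ^ m) n := by
  intro m
  induction m with
  | zero =>
    intro x hx hlt
    have hxn : x < n := by simpa using hlt
    simp [pvPadDigits, Int.emod_eq_of_lt hx hxn]
  | succ m ih =>
    intro x hx hlt
    have hnpos : (0:Int) < n := by omega
    have hPpos : (0:Int) < n ^ m := pow_pos hnpos m
    have hdivnn : 0 ≤ x / n := Int.ediv_nonneg hx (by omega)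
    have hdivlt : x / n < n ^ (m + 1) := by
      rw [Int.ediv_lt_iff_lt_mul hnpos]
      calc x < n ^ (m + 2) := hlt
        _ = n ^ (m + 1) * n := by ring
    have e1 : x / n / n ^ m = x / n ^ (m + 1) := by
      rw [Int.ediv_ediv_of_nonneg (by omega : (0:Int) ≤ n)]
      congr 1; ring
    have e2 : (x / n) % n ^ m = x % n ^ (m + 1) / n := by
      rw [← pv_emod_mul_ediv x n (n ^ m) hnpos hPpos]
      congr 2; ring
    have e3 : x % n ^ (m + 1) % n = x % n := by
      exact Int.emod_emod_of_dvd x ⟨n ^ m, by ring⟩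
    show pvPadDigits (m + 1) (x / n) n ++ [x % n]
        = x / n ^ (m + 1) :: (pvPadDigits m (x % n ^ (m + 1) / n) n ++ [x % n ^ (m + 1) % n])
    rw [ih (x / n) hdivnn hdivlt, e1, e2, e3]
    simp

-- the LSB recursion yields exactly the k+1 digits of x when n^k ≤ x < n^(k+1)
theorem pv_rec_eq_pad (n : Int) (hn : 2 ≤ n) :
    ∀ (k fuel : Nat) (x : Int), n ^ k ≤ x → x < n ^ (k + 1) → x.toNat < fuel →
      pvRecLSB fuel x n = pvPadDigits (k + 1) x n := by
  intro k
  induction k with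
  | zero =>
    intro fuel x hlo hhi hfuel
    have hx1 : 1 ≤ x := by simpa using hlo
    have hxn : x < n := by simpa using hhi
    obtain ⟨f, rfl⟩ : ∃ f, fuel = f + 1 := ⟨fuel - 1, by omega⟩
    have hdiv0 : PySem.Int.floordiv x n = 0 := by
      rw [PySem.Int.floordiv_eq_ediv_of_pos (by omega)]
      exact Int.ediv_eq_zero_of_lt (by omega) hxn
    have hrec0 : ∀ f', pvRecLSB f' (0:Int) n = [] := by
      intro f'; cases f' <;> simp [pvRecLSB]
    simp only [pvRecLSB, if_neg (by omega : ¬ x = 0), hdiv0, hrec0]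
    rw [PySem.Int.mod_eq_emod_of_pos (by omega)]
    simp [pvPadDigits, Int.emod_eq_of_lt (by omega) hxn]
  | succ k ih =>
    intro fuel x hlo hhi hfuel
    have hnpos : (0:Int) < n := by omega
    have hx1 : 1 ≤ x := le_trans (one_le_pow₀ (by omega)) hlo
    obtain ⟨f, rfl⟩ : ∃ f, fuel = f + 1 := ⟨fuel - 1, by omega⟩
    have hb := pv_floordiv_bounds x n (by omega) hn
    have hlo' : n ^ k ≤ PySem.Int.floordiv x n := by
      rw [PySem.Int.floordiv_eq_ediv_of_pos (by omega), Int.le_ediv_iff_mul_le hnpos]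
      calc n ^ k * n = n ^ (k + 1) := by ring
        _ ≤ x := hlo
    have hhi' : PySem.Int.floordiv x n < n ^ (k + 1) := by
      rw [PySem.Int.floordiv_eq_ediv_of_pos (by omega), Int.ediv_lt_iff_lt_mul hnpos]
      calc x < n ^ (k + 2) := hhi
        _ = n ^ (k + 1) * n := by ring
    have hfuel' : (PySem.Int.floordiv x n).toNat < f := by omega
    simp only [pvRecLSB, if_neg (by omega : ¬ x = 0)]
    rw [ih f (PySem.Int.floordiv x n) hlo' hhi' hfuel']
    show pvPadDigits (k + 1) (PySem.Int.floordiv x n) n ++ [PySem.Int.mod x n]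
        = pvPadDigits (k + 1) (x / n) n ++ [x % n]
    rw [PySem.Int.floordiv_eq_ediv_of_pos (by omega), PySem.Int.mod_eq_emod_of_pos (by omega)]

-- B's digit loop starting at p = n^k produces the k+1 fixed-width digits of x
theorem pv_digits_eq_pad (n : Int) (hn : 2 ≤ n) :
    ∀ (k fuel : Nat) (x : Int), 0 ≤ x → x < n ^ (k + 1) → k < fuel →
      pvBDigits fuel x n (n ^ k) = pvPadDigits (k + 1) x n := by
  intro k
  induction k with
  | zero =>
    intro fuel x hx hlt hfuel
    obtain ⟨f, rfl⟩ : ∃ f, fuel = f + 1 := ⟨fuel - 1, by omega⟩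
    have hdivn : PySem.Int.floordiv 1 n = 0 := by
      rw [PySem.Int.floordiv_eq_ediv_of_pos (by omega)]
      exact Int.ediv_eq_zero_of_lt (by omega) (by omega)
    have hstop : ∀ f' y, pvBDigits f' y n (0:Int) = [] := by
      intro f' y; cases f' <;> simp [pvBDigits]
    simp only [pow_zero] at *
    simp only [pvBDigits, if_pos (le_refl (1:Int)), hdivn, hstop]
    rw [PySem.Int.floordiv_eq_ediv_of_pos (by omega : (0:Int) < 1), Int.ediv_one]
    simp [pvPadDigits, Int.emod_eq_of_lt hx (by simpa using hlt)]
  | succ k ih =>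
    intro fuel x hx hlt hfuel
    obtain ⟨f, rfl⟩ : ∃ f, fuel = f + 1 := ⟨fuel - 1, by omega⟩
    have hnpos : (0:Int) < n := by omega
    have hPpos : (0:Int) < n ^ (k + 1) := pow_pos hnpos _
    have hp1 : (1:Int) ≤ n ^ (k + 1) := hPpos
    have hpdiv : PySem.Int.floordiv (n ^ (k + 1)) n = n ^ k := by
      rw [PySem.Int.floordiv_eq_ediv_of_pos (by omega)]
      rw [show n ^ (k + 1) = n ^ k * n by ring]
      exact Int.mul_ediv_cancel _ (by omega)
    have hmod0 : 0 ≤ PySem.Int.mod x (n ^ (k + 1)) := by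
      rw [PySem.Int.mod_eq_emod_of_pos hPpos]; exact Int.emod_nonneg x (by omega)
    have hmodlt : PySem.Int.mod x (n ^ (k + 1)) < n ^ (k + 1) := by
      rw [PySem.Int.mod_eq_emod_of_pos hPpos]; exact Int.emod_lt_of_pos x hPpos
    simp only [pvBDigits, if_pos hp1, hpdiv]
    rw [ih f (PySem.Int.mod x (n ^ (k + 1))) hmod0 hmodlt (by omega)]
    rw [pv_msb_split n hn (k + 1) x hx hlt]
    rw [PySem.Int.floordiv_eq_ediv_of_pos hPpos, PySem.Int.mod_eq_emod_of_pos hPpos]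

-- B's power loop lands on the largest power n^k with n^k ≤ x
theorem pv_pow_spec (x n : Int) (hn : 2 ≤ n) :
    ∀ (fuel : Nat) (p : Int), 0 < p → p ≤ x → (∃ j : Nat, p = n ^ j) → x < p * n ^ fuel →
      ∃ k : Nat, pvBPow fuel x n p = n ^ k ∧ n ^ k ≤ x ∧ x < n ^ (k + 1) := by
  intro fuel
  induction fuel with
  | zero =>
    intro p hp hpx _ hbound
    simp only [pow_zero, mul_one] at hbound; omega
  | succ fuel ih =>
    intro p hp hpx hpow hbound
    obtain ⟨j, rfl⟩ := hpow
    by_cases hstep : n ^ j * n ≤ x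
    · have := ih (n ^ j * n) (by positivity) hstep ⟨j + 1, by ring⟩
        (by calc x < n ^ j * n ^ (fuel + 1) := hbound
              _ = n ^ j * n * n ^ fuel := by ring)
      simpa [pvBPow, if_pos hstep] using this
    · refine ⟨j, by simp [pvBPow, if_neg hstep], hpx, ?_⟩
      calc x < n ^ j * n := by omega
        _ = n ^ (j + 1) := by ring

theorem pv_big_pow (n : Int) (hn : 2 ≤ n) (m : Nat) : (m : Int) < n ^ m := by
  have h2 : (m : Int) < 2 ^ m := by exact_mod_cast Nat.lt_two_pow_self
  have hle : (2:Int) ^ m ≤ n ^ m := pow_le_pow_left₀ (by norm_num) (by omega) m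
  omega

-- ===== VERDICT (by name: the statement is the Claim_ definition above) =====
theorem base10_to_basen_spec : Claim_equal_base10_to_basen := by
  intro x n _ hpre
  obtain ⟨hx, hn⟩ := hpre
  unfold Spec_base10_to_basen base10_to_basen base10_to_basen_alt
  by_cases hz : x = 0
  · subst hz; simp [pvALoop]
  · rw [if_neg hz]
    have hx1 : 1 ≤ x := by omega
    have hbound : x < 1 * n ^ (x.toNat + 1) := by
      have := pv_big_pow n hn (x.toNat + 1); omega
    obtain ⟨k, hpk, hklo, hkhi⟩ :=
      pv_pow_spec x n hn (x.toNat + 1) 1 one_pos hx1 ⟨0, (pow_zero n).symm⟩ hbound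
    have hkfuel : k < x.toNat + 1 := by
      have h1 : (k : Int) < n ^ k := pv_big_pow n hn k
      omega
    rw [hpk, pv_digits_eq_pad n hn k (x.toNat + 1) x hx hkhi hkfuel]
    have := pvALoop_reverse_eq (x.toNat + 1) x n [] hn hx (by omega)
    rw [this, pv_rec_eq_pad n hn k (x.toNat + 1) x hklo hkhi (by omega)]
    simp
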